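-- pv_equiv track=rewrite | github.com/cel34-bath/PythonMaple | PythonTools/WorkWithMaple/polynomials_for_roots/extract_univariates.py | search_univariates
-- ===== SOURCE A (Python) =====
-- def search_univariates(polynomials):
--     '''This function is given 'polynomials', a list of polynomials in their matricial form and a list of the univariate polynomials in that list is returned'''
--
--     univariates = []
--     for polynomial in polynomials:
--         degrees = [monomial[:-1] for monomial in polynomial]
--         used_variables = [sum(elem)!=0 for elem in zip(*degrees)]
--         if sum(used_variables)==1 and sum([monomial[used_variables.index(1)] for monomial in polynomial])>1: # This is true if polynomial is univariate and if the degree of the polynomial is strictly greater than one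
--             univariates += [[[monomial[used_variables.index(1)], monomial[-1]] for monomial in polynomial]] # the polynomial is rewritten using only one variable
--     return univariates
-- ===== SOURCE B (Python) =====
-- def search_univariates(polynomials):
--     '''Column-oriented search: instead of transposing the degree rows and
--     counting nonzero columns, scan columns left-to-right for the first one
--     with a nonzero degree sum, then check every later column sums to zero.'''
--     def colsum(poly, i):
--         return sum(m[i] for m in poly)
--     result = []
--     for poly in polynomials:
--         width = min((len(m) for m in poly), default=0) - 1
--         j = 0
--         while j < width and colsum(poly, j) == 0:
--             j += 1
--         if j < width and all(colsum(poly, i) == 0 for i in range(j + 1, width)) and colsum(poly, j) > 1: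
--             result.append([[m[j], m[-1]] for m in poly])
--     return result
-- ===== Notes on version B (the rewrite author's own statement) =====
-- stated objective: alternative
-- what changed: B is column-oriented: per polynomial it computes min monomial length once, scans columns left-to-right with a while loop for the first column with nonzero degree sum, then checks all later column sums are zero and that the found column's sum exceeds 1; A is row-oriented, building all degree rows, transposing with zip(*degrees), mapping to a boolean used-variables list, counting it and re-locating the variable with repeated .index(1) passes.
import Mathlib
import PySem

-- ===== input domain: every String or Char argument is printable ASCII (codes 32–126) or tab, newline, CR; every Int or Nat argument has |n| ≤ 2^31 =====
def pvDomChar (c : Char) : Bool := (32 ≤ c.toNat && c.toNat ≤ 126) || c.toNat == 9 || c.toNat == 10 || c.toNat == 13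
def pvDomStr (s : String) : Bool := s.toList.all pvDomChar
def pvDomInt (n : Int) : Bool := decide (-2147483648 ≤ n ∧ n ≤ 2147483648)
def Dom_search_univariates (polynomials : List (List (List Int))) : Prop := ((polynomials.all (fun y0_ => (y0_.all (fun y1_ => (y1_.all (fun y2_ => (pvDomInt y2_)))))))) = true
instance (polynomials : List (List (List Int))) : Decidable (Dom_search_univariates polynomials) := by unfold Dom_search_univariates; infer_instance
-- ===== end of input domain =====

-- B replaces A's row-transpose + boolean used-variables list + repeated .index(1) passes by a
-- column-oriented scan: find the first column with nonzero degree sum, check the rest are zero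
-- (objective: alternative algorithmic decomposition; not claimed faster).

-- ===== PORT A =====
-- hand port of Python's zip(*rows) on a list of int rows: exact — tuples of i-th elements,
-- length = the minimum row length (empty when rows = []); getD's default is never used since i < every row length
def pyZipStar (rows : List (List Int)) : List (List Int) :=
  match rows with
  | [] => []
  | r :: rs =>
      (List.range (rs.foldl (fun m l => min m l.length) r.length)).map
        (fun i => (r :: rs).map (fun row => row.getD i 0))

def search_univariates (polynomials : List (List (List Int))) : List (List (List Int)) :=
  List.foldl (α := List (List (List Int))) (β := List (List Int))
    (fun univariates polynomial =>
      let degrees := polynomial.map (fun monomial => PySem.List.slice monomial none (some (-1)))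
      let used_variables := (pyZipStar degrees).map (fun col => decide (col.sum ≠ 0))
      -- used_variables.index(1) is only evaluated under sum(used_variables)==1, so .getD 0 is never the default;
      -- likewise both pyGet? indices are always in range (j < min degree-row length), so .getD 0 is exact
      if (used_variables.map (fun b => if b then (1 : Int) else 0)).sum = 1 ∧
          1 < (polynomial.map (fun monomial =>
                (PySem.List.pyGet? monomial (((PySem.List.index? used_variables true).getD 0 : Nat) : Int)).getD 0)).sum
      then univariates ++ [polynomial.map (fun monomial =>
              [(PySem.List.pyGet? monomial (((PySem.List.index? used_variables true).getD 0 : Nat) : Int)).getD 0,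
               (PySem.List.pyGet? monomial (-1)).getD 0])]
      else univariates)
    [] polynomials

-- ===== PORT B =====
-- colsum(poly, i) = sum(m[i] for m in poly); every call site keeps i in range, so .getD 0 is exact
def svB_colsum (poly : List (List Int)) (i : Int) : Int :=
  (poly.map (fun m => (PySem.List.pyGet? m i).getD 0)).sum

-- the 'while j < width and colsum(poly, j) == 0: j += 1' loop
def svB_find (poly : List (List Int)) (width : Int) (j : Int) : Int :=
  if h : j < width ∧ svB_colsum poly j = 0 then svB_find poly width (j + 1) else j
termination_by (width - j).toNat
decreasing_by omega

def search_univariates_alt (polynomials : List (List (List Int))) : List (List (List Int)) :=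
  List.foldl (α := List (List (List Int))) (β := List (List Int))
    (fun result poly =>
      -- min((len(m) for m in poly), default=0) - 1
      let width : Int := (PySem.List.min? (poly.map (fun m => (m.length : Int))) (fun x => x)).getD 0 - 1
      let j := svB_find poly width 0
      if j < width ∧
         ((PySem.List.pyRange (j + 1) width 1).all (fun i => decide (svB_colsum poly i = 0))) = true ∧
         1 < svB_colsum poly j
      then result ++ [poly.map (fun m =>
              [(PySem.List.pyGet? m j).getD 0, (PySem.List.pyGet? m (-1)).getD 0])]
      else result)
    [] polynomials

-- ===== PRECONDITION & SPEC =====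
def Spec_search_univariates (polynomials : List (List (List Int))) (out : List (List (List Int))) : Prop := out = search_univariates_alt polynomials
instance (polynomials : List (List (List Int))) (out : List (List (List Int))) : Decidable (Spec_search_univariates polynomials out) := by unfold Spec_search_univariates; infer_instance

-- ===== CLAIM (what is proved, stated in full; the proofs are below) =====
def Claim_equal_search_univariates : Prop := ∀ (polynomials : List (List (List Int))), Dom_search_univariates polynomials → Spec_search_univariates polynomials (search_univariates polynomials)

-- ===== LEMMAS AND PROOFS =====

lemma pv_minle (rs : List (List Int)) (a : Nat) :
    rs.foldl (fun m l => min m l.length) a ≤ a := by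
  induction rs generalizing a with
  | nil => simp
  | cons d t ih => exact le_trans (ih _) (Nat.min_le_left _ _)

lemma pv_minle_mem (rs : List (List Int)) (a : Nat) {r : List Int} (h : r ∈ rs) :
    rs.foldl (fun m l => min m l.length) a ≤ r.length := by
  induction rs generalizing a with
  | nil => cases h
  | cons d t ih =>
      rcases List.mem_cons.mp h with rfl | h'
      · exact le_trans (pv_minle t _) (Nat.min_le_right _ _)
      · exact ih _ h'

-- indices of the nonzero entries of a list, in increasing order
def pvNz : List Int → List Nat
  | [] => []
  | x :: t => if x ≠ 0 then 0 :: (pvNz t).map (· + 1) else (pvNz t).map (· + 1)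

lemma pv_nz_len (cs : List Int) :
    (pvNz cs).length = cs.countP (fun x => decide (x ≠ 0)) := by
  induction cs with
  | nil => simp [pvNz]
  | cons x t ih =>
      by_cases hx : x ≠ 0 <;> simp [pvNz, hx, ih]

lemma pv_nz_mem (cs : List Int) (k : Nat) :
    k ∈ pvNz cs ↔ (k < cs.length ∧ cs.getD k 0 ≠ 0) := by
  induction cs generalizing k with
  | nil => simp [pvNz]
  | cons x t ih =>
      cases k with
      | zero =>
          by_cases hx : x ≠ 0 <;> simp [pvNz, hx]
      | succ n =>
          have hmap : (n + 1) ∈ (pvNz t).map (· + 1) ↔ n ∈ pvNz t := by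
            constructor
            · intro h
              obtain ⟨a, ha, he⟩ := List.mem_map.mp h
              have : a = n := by omega
              exact this ▸ ha
            · intro h; exact List.mem_map.mpr ⟨n, h, rfl⟩
          by_cases hx : x ≠ 0 <;>
            simp [pvNz, hx, hmap, ih]

lemma pv_nz_lt (cs : List Int) {k : Nat} (h : k ∈ pvNz cs) : k < cs.length :=
  ((pv_nz_mem cs k).mp h).1

lemma pv_nz_sorted (cs : List Int) : (pvNz cs).Pairwise (· < ·) := by
  induction cs with
  | nil => simp [pvNz]
  | cons x t ih =>
      have hmap : ((pvNz t).map (· + 1)).Pairwise (· < ·) :=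
        List.pairwise_map.mpr (ih.imp (by omega))
      by_cases hx : x ≠ 0
      · simp only [pvNz, if_pos hx]
        refine List.pairwise_cons.mpr ⟨?_, hmap⟩
        intro b hb
        obtain ⟨a, _, rfl⟩ := List.mem_map.mp hb
        omega
      · simpa [pvNz, hx] using hmap

lemma pv_idx_head (cs : List Int) :
    PySem.List.index? (cs.map (fun x => decide (x ≠ 0))) true = (pvNz cs).head? := by
  induction cs with
  | nil => simp [pvNz, PySem.List.index?]
  | cons x t ih =>
      by_cases hx : x ≠ 0
      · have hd : decide (x ≠ 0) = true := by simp [hx]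
        simp only [List.map_cons, hd, pvNz, if_pos hx]
        rw [PySem.List.index?_cons_self]
        simp
      · have hd : decide (x ≠ 0) = false := by simpa using hx
        simp only [List.map_cons, hd, pvNz, if_neg hx]
        rw [PySem.List.index?_cons_of_ne _ (by simp)]
        rw [ih]
        cases pvNz t <;> simp

-- Nat min over (lengths - 1) is (Nat min over lengths) - 1
lemma pv_L_ML (t : List (List Int)) (a : Nat) :
    (t.map List.dropLast).foldl (fun mm l => min mm l.length) (a - 1)
      = (t.foldl (fun mm l => min mm l.length) a) - 1 := by
  induction t generalizing a with
  | nil => simp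
  | cons d r ih =>
      simp only [List.map_cons, List.foldl_cons, List.length_dropLast]
      rw [show min (a - 1) (d.length - 1) = min a d.length - 1 by omega, ih]

lemma pv_foldmin_cast (t : List (List Int)) (a : Nat) :
    (t.map (fun m => (m.length : Int))).foldl min (a : Int)
      = ((t.foldl (fun mm l => min mm l.length) a : Nat) : Int) := by
  induction t generalizing a with
  | nil => simp
  | cons d r ih =>
      simp only [List.map_cons, List.foldl_cons]
      rw [show min (a : Int) (d.length : Int) = ((min a d.length : Nat) : Int) by push_cast; rfl, ih]

-- characterization of the while-loop: it stops at the first index ≥ j whose column sum is nonzero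
lemma svB_find_eq (p : List (List Int)) (C : List Int)
    (hc : ∀ i : Nat, i < C.length → svB_colsum p (i : Int) = C.getD i 0)
    (j k : Nat) (hjk : j ≤ k) (hkL : k ≤ C.length)
    (h0 : ∀ i : Nat, j ≤ i → i < k → C.getD i 0 = 0)
    (hk : k < C.length → C.getD k 0 ≠ 0) :
    svB_find p (C.length : Int) (j : Int) = (k : Int) := by
  obtain ⟨n, hn⟩ : ∃ n, k - j = n := ⟨_, rfl⟩
  induction n generalizing j with
  | zero =>
      have hjk' : j = k := by omega
      subst hjk'
      rw [svB_find.eq_def]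
      rcases Nat.lt_or_ge j C.length with hlt | hge
      · rw [dif_neg]
        rintro ⟨-, hz⟩
        exact hk hlt (by rw [← hc j hlt]; exact hz)
      · rw [dif_neg]
        rintro ⟨hlt, -⟩
        omega
  | succ n ih =>
      have hjlt : j < k := by omega
      have hjL : j < C.length := by omega
      rw [svB_find, dif_pos ⟨by exact_mod_cast hjL, by rw [hc j hjL]; exact h0 j le_rfl hjlt⟩]
      have : ((j : Int) + 1) = ((j + 1 : Nat) : Int) := by push_cast; ring
      rw [this]
      exact ih (j + 1) (by omega) (fun i hi1 hi2 => h0 i (by omega) hi2) (by omega)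

theorem search_univariates_spec : Claim_equal_search_univariates := by
  intro polys _
  unfold Spec_search_univariates
  show search_univariates polys = search_univariates_alt polys
  unfold search_univariates search_univariates_alt
  apply PySem.List.foldl_congr_mem
  intro acc p _
  dsimp only
  cases p with
  | nil =>
      rw [svB_find.eq_def]
      simp [pyZipStar, PySem.List.min?]
  | cons m t =>
      have hslice : (m :: t).map (fun monomial => PySem.List.slice monomial none (some (-1)))
          = m.dropLast :: t.map List.dropLast := by
        simp [PySem.List.slice_to_neg_one]
      set ML := t.foldl (fun mm l => min mm l.length) m.length with hML
      set L := List.foldl (fun mm l => min mm l.length) m.dropLast.length (t.map List.dropLast) with hLdef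
      have hL_ML : L = ML - 1 := by
        rw [hLdef, hML, ← pv_L_ML, List.length_dropLast]
      set C := (List.range L).map
          (fun i => ((m.dropLast :: t.map List.dropLast).map (fun row => row.getD i 0)).sum) with hCdef
      have hCL : C.length = L := by simp [hCdef]
      have hwidth : (PySem.List.min? ((m :: t).map (fun m => (m.length : Int))) (fun x => x)).getD 0 - 1
          = (ML : Int) - 1 := by
        simp only [List.map_cons]
        rw [PySem.List.min?_id_cons]
        simp only [Option.getD_some]
        rw [pv_foldmin_cast]
      have huv : (pyZipStar ((m :: t).map (fun monomial => PySem.List.slice monomial none (some (-1))))).map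
            (fun col => decide (col.sum ≠ 0)) = C.map (fun x => decide (x ≠ 0)) := by
        rw [hslice]
        show ((List.range L).map
            (fun i => (m.dropLast :: t.map List.dropLast).map (fun row => row.getD i 0))).map
              (fun col => decide (col.sum ≠ 0)) = _
        rw [hCdef, List.map_map, List.map_map]
        rfl
      have hsum1 : (List.map (fun b => if b = true then (1 : Int) else 0)
            (C.map (fun x => decide (x ≠ 0)))).sum = (C.countP (fun x => decide (x ≠ 0)) : Int) := by
        rw [List.map_map]
        exact PySem.List.sum_map_ite_one_zero (fun x => decide (x ≠ 0)) C
      -- column sums agree with C on [0, L)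
      have hbound : ∀ i : Nat, i < L → ∀ mon ∈ (m :: t), i < mon.dropLast.length := by
        intro i hi mon hmon
        rcases List.mem_cons.mp hmon with rfl | h'
        · exact lt_of_lt_of_le hi (pv_minle _ _)
        · exact lt_of_lt_of_le hi (pv_minle_mem _ _ (List.mem_map_of_mem h'))
      have hget : ∀ i : Nat, i < L → ∀ mon ∈ (m :: t),
          (PySem.List.pyGet? mon ((i : Nat) : Int)).getD 0 = mon.dropLast.getD i 0 := by
        intro i hi mon hmon
        have hlt := hbound i hi mon hmon
        have hlt' : i < mon.length := lt_of_lt_of_le hlt (by simp [List.length_dropLast])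
        rw [PySem.List.pyGet?_natCast, List.getElem?_eq_getElem hlt', Option.getD_some,
            List.getD_eq_getElem _ _ hlt, List.getElem_dropLast]
      have hcs : ∀ i : Nat, i < C.length → svB_colsum (m :: t) (i : Int) = C.getD i 0 := by
        intro i hi
        rw [hCL] at hi
        unfold svB_colsum
        rw [List.map_congr_left (fun mon hmon => hget i hi mon hmon)]
        have hiC : i < C.length := by rw [hCL]; exact hi
        rw [List.getD_eq_getElem _ _ hiC]
        have : C[i] = ((m.dropLast :: t.map List.dropLast).map (fun row => row.getD i 0)).sum := by
          simp [hCdef]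
        rw [this]
        simp only [List.map_cons, List.map_map, List.sum_cons]
        rfl
      rcases Nat.eq_zero_or_pos ML with hML0 | hMLpos
      · -- some monomial is empty: width = -1 and C = [], so both sides skip this polynomial
        have hL0 : L = 0 := by omega
        have hC0 : C = [] := by rw [hCdef, hL0]; simp
        have hwidth' : (PySem.List.min? ((m :: t).map (fun m => (m.length : Int))) (fun x => x)).getD 0 - 1
            = (-1 : Int) := by rw [hwidth, hML0]; norm_num
        rw [hwidth', huv, hC0]
        rw [svB_find, dif_neg (by rintro ⟨h1, -⟩; omega)]
        rw [if_neg (by rintro ⟨h1, -⟩; norm_num at h1), if_neg (by rintro ⟨h1, -⟩; omega)]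
      · -- every monomial is nonempty: width = (L : Int)
        have hwidth' : (PySem.List.min? ((m :: t).map (fun m => (m.length : Int))) (fun x => x)).getD 0 - 1
            = (L : Int) := by rw [hwidth, hL_ML]; omega
        rw [hwidth', huv]
        rcases hnz : pvNz C with _ | ⟨k, rest⟩
        · -- no used variable: both sides skip
          have hall0 : ∀ i : Nat, i < C.length → C.getD i 0 = 0 := by
            intro i hi
            by_contra hne
            have : i ∈ pvNz C := (pv_nz_mem C i).mpr ⟨hi, hne⟩
            rw [hnz] at this; cases this
          have hfind : svB_find (m :: t) ((L : Nat) : Int) ((0 : Nat) : Int) = (C.length : Int) := by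
            rw [← hCL]
            exact svB_find_eq (m :: t) C hcs 0 C.length (Nat.zero_le _) le_rfl
              (fun i _ hi => hall0 i hi) (fun h => absurd h (by omega))
          rw [show ((0 : Nat) : Int) = (0 : Int) by norm_num] at hfind
          rw [hfind, hCL]
          have hcnt : C.countP (fun x => decide (x ≠ 0)) = 0 := by
            rw [← pv_nz_len, hnz]; rfl
          rw [if_neg (by rintro ⟨h1, -⟩; rw [hsum1, hcnt] at h1; norm_num at h1),
              if_neg (by rintro ⟨h1, -⟩; omega)]
        · have hkmem : k ∈ pvNz C := by rw [hnz]; exact List.mem_cons_self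
          have hkC : k < C.length := pv_nz_lt C hkmem
          have hCk0 : C.getD k 0 ≠ 0 := ((pv_nz_mem C k).mp hkmem).2
          have hsorted := pv_nz_sorted C
          rw [hnz] at hsorted
          have hkfirst : ∀ i : Nat, i < k → C.getD i 0 = 0 := by
            intro i hik
            by_contra hne
            have himem : i ∈ pvNz C := (pv_nz_mem C i).mpr ⟨by omega, hne⟩
            rw [hnz] at himem
            rcases List.mem_cons.mp himem with rfl | h'
            · omega
            · have := (List.pairwise_cons.mp hsorted).1 i h'
              omega
          have hfind : svB_find (m :: t) ((L : Nat) : Int) ((0 : Nat) : Int) = ((k : Nat) : Int) := by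
            rw [← hCL]
            exact svB_find_eq (m :: t) C hcs 0 k (Nat.zero_le _) (le_of_lt hkC)
              (fun i _ hi => hkfirst i hi) (fun _ => hCk0)
          rw [show ((0 : Nat) : Int) = (0 : Int) by norm_num] at hfind
          rw [hfind]
          have hidx : PySem.List.index? (C.map (fun x => decide (x ≠ 0))) true = some k := by
            rw [pv_idx_head, hnz]; rfl
          rw [hidx]
          simp only [Option.getD_some]
          have hAsum : (List.map (fun monomial => (PySem.List.pyGet? monomial ((k : Nat) : Int)).getD 0) (m :: t)).sum
              = C.getD k 0 := hcs k hkC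
          have hBdeg : svB_colsum (m :: t) ((k : Nat) : Int) = C.getD k 0 := hcs k hkC
          rcases rest with _ | ⟨k2, r2⟩
          · -- exactly one used variable: both conditions reduce to 1 < C[k]
            have hcnt : C.countP (fun x => decide (x ≠ 0)) = 1 := by
              rw [← pv_nz_len, hnz]; rfl
            have hall : (PySem.List.pyRange ((k : Int) + 1) (L : Int) 1).all
                (fun i => decide (svB_colsum (m :: t) i = 0)) = true := by
              rw [List.all_eq_true]
              intro i hi
              obtain ⟨hi1, hi2⟩ := (PySem.List.mem_pyRange_one).mp hi
              have hnn : 0 ≤ i := by omega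
              obtain ⟨n, rfl⟩ : ∃ n : Nat, i = (n : Int) := ⟨i.toNat, by omega⟩
              have hnL : n < C.length := by rw [hCL]; exact_mod_cast hi2
              have hz : C.getD n 0 = 0 := by
                by_contra hne
                have : n ∈ pvNz C := (pv_nz_mem C n).mpr ⟨hnL, hne⟩
                rw [hnz] at this
                rcases List.mem_cons.mp this with rfl | h'
                · omega
                · cases h'
              rw [hcs n hnL, hz]
              simp
            by_cases hdeg : 1 < C.getD k 0
            · rw [if_pos ⟨by rw [hsum1, hcnt]; norm_num, by rw [hAsum]; exact hdeg⟩,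
                  if_pos ⟨by rw [← hCL]; exact_mod_cast hkC, hall, by rw [hBdeg]; exact hdeg⟩]
            · rw [if_neg (by rintro ⟨-, h2⟩; rw [hAsum] at h2; exact hdeg h2),
                  if_neg (by rintro ⟨-, -, h3⟩; rw [hBdeg] at h3; exact hdeg h3)]
          · -- at least two used variables: both sides skip
            have hk2mem : k2 ∈ pvNz C := by rw [hnz]; exact List.mem_cons.mpr (Or.inr List.mem_cons_self)
            have hk2C : k2 < C.length := pv_nz_lt C hk2mem
            have hkk2 : k < k2 := (List.pairwise_cons.mp hsorted).1 k2 List.mem_cons_self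
            have hcnt : C.countP (fun x => decide (x ≠ 0)) = r2.length + 2 := by
              rw [← pv_nz_len, hnz]; simp
            have hallF : (PySem.List.pyRange ((k : Int) + 1) (L : Int) 1).all
                (fun i => decide (svB_colsum (m :: t) i = 0)) = false := by
              rw [List.all_eq_false]
              refine ⟨(k2 : Int), ?_, ?_⟩
              · rw [PySem.List.mem_pyRange_one]
                constructor
                · exact_mod_cast hkk2
                · rw [← hCL]; exact_mod_cast hk2C
              · rw [hcs k2 hk2C]
                simpa using ((pv_nz_mem C k2).mp hk2mem).2
            rw [if_neg (by rintro ⟨h1, -⟩; rw [hsum1, hcnt] at h1; push_cast at h1; omega),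
                if_neg (by rintro ⟨-, h2, -⟩; rw [hallF] at h2; cases h2)]
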